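-- pv_equiv track=rewrite | github.com/HarshaanNiles010/leetcode_soltuions | Algorithms/static_sliding_window.py | static_window
-- ===== SOURCE A (Python) =====
-- from typing import List
--
-- def static_window(nums: List[int], length: int) -> List[int]:
--     # here length represents the window length required
--     windowSum = sum(nums[:length])
--     res = [windowSum]
--     for i in range(1, len(nums) - length + 1):
--         windowSum -= nums[i - 1]
--         windowSum += nums[i + length - 1]
--         res.append(windowSum)
--     return res
-- ===== SOURCE B (Python) =====
-- from typing import List
--
-- def static_window(nums: List[int], length: int) -> List[int]:
--     # prefix-sum table: each window sum is a difference of two prefix sums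
--     n = len(nums)
--     P = [0]
--     for x in nums:
--         P.append(P[-1] + x)
--     k = min(length, n)
--     return [P[i + k] - P[i] for i in range(max(n - k, 0) + 1)]
-- ===== Notes on version B (the rewrite author's own statement) =====
-- stated objective: alternative
-- what changed: Replaces the rolling-sum accumulator (subtract the leaving element, add the entering one each step) with a precomputed prefix-sum table; each window sum is then a single subtraction P[i+k]-P[i], with no per-step add/remove of list elements.
import Mathlib
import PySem

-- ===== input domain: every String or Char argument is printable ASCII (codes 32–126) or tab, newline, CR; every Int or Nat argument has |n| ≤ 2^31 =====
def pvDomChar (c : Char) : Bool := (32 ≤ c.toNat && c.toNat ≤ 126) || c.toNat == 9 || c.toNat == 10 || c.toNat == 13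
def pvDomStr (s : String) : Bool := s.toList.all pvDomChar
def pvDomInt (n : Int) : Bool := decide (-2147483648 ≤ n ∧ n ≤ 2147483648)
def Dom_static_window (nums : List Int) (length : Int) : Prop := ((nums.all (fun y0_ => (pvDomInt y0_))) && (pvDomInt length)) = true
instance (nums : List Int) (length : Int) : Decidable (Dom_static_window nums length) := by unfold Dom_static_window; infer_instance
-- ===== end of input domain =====

-- B replaces A's rolling-sum accumulator with a prefix-sum table; window sums become prefix differences (objective: alternative).

-- ===== PORT A =====
-- rolling window sum; pyGetD is exact on Pre_ (0 ≤ length makes both indices in range)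
def static_window (nums : List Int) (length : Int) : List Int :=
  let windowSum : Int := (PySem.List.slice nums none (some length)).sum
  let st := (PySem.List.pyRange 1 ((nums.length : Int) - length + 1) 1).foldl
    (fun (st : Int × List Int) i =>
      let w := st.1 - PySem.List.pyGetD nums (i - 1) 0 + PySem.List.pyGetD nums (i + length - 1) 0
      (w, st.2 ++ [w]))
    (windowSum, [windowSum])
  st.2

-- ===== PORT B =====
def static_window_alt (nums : List Int) (length : Int) : List Int :=
  let n : Int := nums.length
  let P : List Int := nums.foldl (fun P x => P ++ [P.getLast?.getD 0 + x]) [0]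
  let k : Int := min length n
  (PySem.List.pyRange 0 (max (n - k) 0 + 1) 1).map
    (fun i => PySem.List.pyGetD P (i + k) 0 - PySem.List.pyGetD P i 0)

-- ===== PRECONDITION & SPEC =====
-- Pre_ excludes negative length, on which A raises IndexError (the rolling update indexes past the end).
def Pre_static_window (nums : List Int) (length : Int) : Prop := 0 ≤ length
instance (nums : List Int) (length : Int) : Decidable (Pre_static_window nums length) := by unfold Pre_static_window; infer_instance
def pvWitness_static_window : List Int × Int := ([1, 2, 3, 4], 2)

def Spec_static_window (nums : List Int) (length : Int) (out : List Int) : Prop := out = static_window_alt nums length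
instance (nums : List Int) (length : Int) (out : List Int) : Decidable (Spec_static_window nums length out) := by unfold Spec_static_window; infer_instance

-- ===== CLAIM (what is proved, stated in full; the proofs are below) =====
def Claim_equal_static_window : Prop := ∀ (nums : List Int) (length : Int), Dom_static_window nums length → Pre_static_window nums length → Spec_static_window nums length (static_window nums length)

-- ===== LEMMAS AND PROOFS =====

-- prefix sum of the first j elements
def preS (nums : List Int) (j : Nat) : Int := (nums.take j).sum

theorem preS_zero (nums : List Int) : preS nums 0 = 0 := rfl

theorem preS_succ (nums : List Int) (j : Nat) (hj : j < nums.length) :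
    preS nums (j + 1) = preS nums j + nums.getD j 0 := by
  unfold preS
  rw [List.sum_take_succ nums j hj]
  congr 1
  simp [List.getD, List.getElem?_eq_getElem hj]

-- characterisation of B's prefix-table fold
theorem buildP (l : List Int) (acc : List Int) :
    l.foldl (fun P x => P ++ [P.getLast?.getD 0 + x]) acc
      = acc ++ (List.range l.length).map (fun j => acc.getLast?.getD 0 + preS l (j + 1)) := by
  induction l generalizing acc with
  | nil => simp
  | cons x xs ih =>
      rw [List.foldl_cons, ih, List.getLast?_concat]
      simp only [Option.getD_some, List.length_cons, List.range_succ_eq_map,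
        List.map_cons, List.map_map, List.append_assoc, List.singleton_append]
      refine congrArg (acc ++ ·) ?_
      refine congrArg₂ List.cons ?_ ?_
      · have h1 : preS (x :: xs) 1 = x := by simp [preS]
        rw [h1]
      · refine List.map_congr_left (fun j _ => ?_)
        simp only [Function.comp_apply]
        have h2 : preS (x :: xs) (j + 1 + 1) = x + preS xs (j + 1) := by simp [preS]
        rw [h2]; ring

theorem P_eq (nums : List Int) :
    nums.foldl (fun P x => P ++ [P.getLast?.getD 0 + x]) [0]
      = (List.range (nums.length + 1)).map (preS nums) := by
  rw [buildP, List.range_succ_eq_map]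
  simp [preS_zero, List.map_map, Function.comp]

-- A's loop, characterised (only runs when L ≤ n)
theorem loopA (nums : List Int) (L : Nat) (hL : L ≤ nums.length) (m : Nat)
    (hm : m ≤ nums.length - L) :
    (PySem.List.pyRange 1 ((m : Int) + 1) 1).foldl
      (fun (st : Int × List Int) i =>
        let w := st.1 - PySem.List.pyGetD nums (i - 1) 0 + PySem.List.pyGetD nums (i + (L : Int) - 1) 0
        (w, st.2 ++ [w]))
      (preS nums L - preS nums 0, [preS nums L - preS nums 0])
    = (preS nums (m + L) - preS nums m,
       (List.range (m + 1)).map (fun j => preS nums (j + L) - preS nums j)) := by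
  induction m with
  | zero =>
      rw [show ((0 : Nat) : Int) + 1 = 1 by norm_num, PySem.List.pyRange_one_eq_nil le_rfl]
      simp
  | succ m ih =>
      have hm' : m ≤ nums.length - L := by omega
      have h1 : (1 : Int) ≤ (m : Int) + 1 := by omega
      rw [show ((m + 1 : Nat) : Int) + 1 = ((m : Int) + 1) + 1 by push_cast; ring,
          PySem.List.pyRange_one_succ_right h1, List.foldl_append, ih hm']
      simp only [List.foldl_cons, List.foldl_nil]
      have e1 : (m : Int) + 1 - 1 = ((m : Nat) : Int) := by ring
      have e2 : (m : Int) + 1 + (L : Int) - 1 = (((m + L : Nat) : Int)) := by push_cast; ring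
      rw [e1, e2, PySem.List.pyGetD_natCast, PySem.List.pyGetD_natCast]
      have hs1 : preS nums (m + 1) = preS nums m + nums.getD m 0 := preS_succ nums m (by omega)
      have hs2 : preS nums (m + L + 1) = preS nums (m + L) + nums.getD (m + L) 0 :=
        preS_succ nums (m + L) (by omega)
      rw [Prod.mk.injEq]
      constructor
      · rw [show m + 1 + L = m + L + 1 by ring, hs1, hs2]; ring
      · conv_rhs => rw [List.range_succ, List.map_append]
        refine congrArg₂ (· ++ ·) rfl ?_
        rw [show preS nums (m + L) - preS nums m - nums.getD m 0 + nums.getD (m + L) 0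
              = preS nums (m + 1 + L) - preS nums (m + 1) from by
            rw [show m + 1 + L = m + L + 1 from by ring, hs1, hs2]; ring]
        simp

-- B, characterised
theorem altB (nums : List Int) (length : Int) (h0 : 0 ≤ length) :
    static_window_alt nums length
      = (List.range (nums.length - min length.toNat nums.length + 1)).map
          (fun j => preS nums (j + min length.toNat nums.length) - preS nums j) := by
  unfold static_window_alt
  simp only [P_eq]
  have hkK : min length ((nums.length : Nat) : Int) = ((min length.toNat nums.length : Nat) : Int) := by
    omega
  rw [hkK]
  have hmax : max ((nums.length : Int) - ((min length.toNat nums.length : Nat) : Int)) 0 + 1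
      = ((nums.length - min length.toNat nums.length + 1 : Nat) : Int) := by
    push_cast; omega
  rw [hmax, PySem.List.pyRange_zero_nat, List.map_map]
  apply List.map_congr_left
  intro j hj
  rw [List.mem_range] at hj
  simp only [Function.comp_apply]
  rw [show ((j : Nat) : Int) + ((min length.toNat nums.length : Nat) : Int)
        = ((j + min length.toNat nums.length : Nat) : Int) by push_cast; ring,
      PySem.List.pyGetD_natCast, PySem.List.pyGetD_natCast,
      PySem.List.getD_map_range _ _ _ _ (by omega), PySem.List.getD_map_range _ _ _ _ (by omega)]

-- ===== VERDICT (by name: the statement is the Claim_ definition above) =====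
theorem static_window_spec : Claim_equal_static_window := by
  intro nums length _ hpre
  unfold Spec_static_window
  unfold Pre_static_window at hpre
  rw [altB nums length hpre]
  unfold static_window
  simp only []
  rw [PySem.List.slice_to nums hpre]
  by_cases hcase : length ≤ (nums.length : Int)
  · -- the loop runs: length.toNat windows
    rw [show length = ((length.toNat : Nat) : Int) from by omega]
    simp only [Int.toNat_natCast]
    rw [show min length.toNat nums.length = length.toNat from by omega]
    rw [show (nums.length : Int) - ((length.toNat : Nat) : Int) + 1
          = ((nums.length - length.toNat : Nat) : Int) + 1 from by omega]
    rw [show (nums.take length.toNat).sum = preS nums length.toNat - preS nums 0 from by simp [preS]]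
    rw [loopA nums length.toNat (by omega) (nums.length - length.toNat) le_rfl]
  · -- length > len(nums): the loop is empty, single window = whole sum
    push_neg at hcase
    rw [PySem.List.pyRange_one_eq_nil (show (nums.length : Int) - length + 1 ≤ 1 from by omega)]
    simp only [List.foldl_nil]
    rw [show min length.toNat nums.length = nums.length from by omega]
    simp [preS, List.take_of_length_le (show nums.length ≤ length.toNat from by omega)]
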